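-- pv_equiv track=rewrite | github.com/aaronGeb/competitive-programming | A2SV Education Phase I - Contest #6 10-Mar-2025/E - Straw Hat's Blue-Red Permutation 300642.py | blue_red_permutation
-- ===== SOURCE A (Python) =====
-- def blue_red_permutation(n, a, s):
--     b = []
--     r = []
--     for i in range(n):
--         if s[i] == "B":
--             b.append(a[i])
--         else:
--             r.append(a[i])
--     b.sort()
--     r.sort()
--     t = sorted(range(1, n + 1))
--     bptr = 0
--     rptr = 0
--     for i in t:
--         if bptr < len(b) and b[bptr] >= i:
--             bptr += 1
--         elif rptr < len(r) and r[rptr] <= i: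
--             rptr += 1
--         else:
--             return "NO"
--     return "YES"
-- ===== SOURCE B (Python) =====
-- def blue_red_permutation(n, a, s):
--     # No sorting: bucket-count blue/red values clamped to 1..n,
--     # then check prefix/suffix count feasibility.
--     size = max(n, 0) + 1
--     cb = [0] * size
--     cr = [0] * size
--     bad = 0
--     for i in range(n):
--         v = a[i]
--         if s[i] == "B":
--             if v < 1:
--                 bad += 1
--             elif v <= n:
--                 cb[v] += 1
--         else:
--             if v > n:
--                 bad += 1
--             elif v >= 1:
--                 cr[v] += 1
--     if bad > 0:
--         return "NO"
--     pb = 0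
--     for v in range(1, size):
--         pb += cb[v]
--         if pb > v:
--             return "NO"
--     sr = 0
--     for v in range(n - 1, -1, -1):
--         sr += cr[v + 1]
--         if sr > n - v:
--             return "NO"
--     return "YES"
-- ===== Notes on version B (the rewrite author's own statement) =====
-- stated objective: alternative
-- what changed: Replaces the two comparison sorts and the pointer-greedy simulation by bucket counting of blue/red values clamped to 1..n plus a prefix/suffix-sum feasibility check (blues at most v below each value v; reds above v at most n-v).
import Mathlib
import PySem

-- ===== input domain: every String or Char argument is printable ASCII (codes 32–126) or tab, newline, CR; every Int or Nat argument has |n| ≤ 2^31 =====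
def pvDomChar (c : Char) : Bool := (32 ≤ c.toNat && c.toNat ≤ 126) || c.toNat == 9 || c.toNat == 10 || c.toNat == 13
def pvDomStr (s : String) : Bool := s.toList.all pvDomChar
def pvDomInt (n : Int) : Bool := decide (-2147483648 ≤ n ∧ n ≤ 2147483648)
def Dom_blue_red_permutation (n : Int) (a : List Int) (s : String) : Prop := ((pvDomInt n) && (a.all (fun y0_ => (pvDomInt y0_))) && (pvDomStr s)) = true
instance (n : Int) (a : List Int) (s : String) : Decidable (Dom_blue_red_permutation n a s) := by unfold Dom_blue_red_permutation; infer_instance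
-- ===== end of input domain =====

-- B replaces A's two sorts + pointer greedy by an alternative algorithm: bucket counting with a
-- prefix/suffix-sum feasibility check; equivalence is proved on all inputs where A does not raise.

-- ===== PORT A =====
def brpGreedy (b r : List Int) : List Int → Int → Int → String
  | [], _, _ => "YES"
  | i :: t, bptr, rptr =>
    if bptr < PySem.List.len b ∧ i ≤ PySem.List.pyGetD b bptr 0 then
      brpGreedy b r t (bptr + 1) rptr
    else if rptr < PySem.List.len r ∧ PySem.List.pyGetD r rptr 0 ≤ i then
      brpGreedy b r t bptr (rptr + 1)
    else "NO"

def blue_red_permutation (n : Int) (a : List Int) (s : String) : String :=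
  let br := (PySem.List.pyRange 0 n 1).foldl
    (fun (p : List Int × List Int) i =>
      if PySem.List.pyGetD s.toList i ' ' = 'B' then
        (p.1 ++ [PySem.List.pyGetD a i 0], p.2)
      else
        (p.1, p.2 ++ [PySem.List.pyGetD a i 0]))
    ([], [])
  let b := PySem.List.sorted br.1 (fun x => x) false
  let r := PySem.List.sorted br.2 (fun x => x) false
  let t := PySem.List.sorted (PySem.List.pyRange 1 (n + 1) 1) (fun x => x) false
  brpGreedy b r t 0 0

-- ===== PORT B =====
def brpStep (n : Int) (a : List Int) (cs : List Char) (st : List Int × List Int × Int) (i : Int) : List Int × List Int × Int :=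
  let v := PySem.List.pyGetD a i 0
  if PySem.List.pyGetD cs i ' ' = 'B' then
    if v < 1 then (st.1, st.2.1, st.2.2 + 1)
    else if v ≤ n then (PySem.List.pySetD st.1 v (PySem.List.pyGetD st.1 v 0 + 1), st.2.1, st.2.2)
    else st
  else
    if n < v then (st.1, st.2.1, st.2.2 + 1)
    else if 1 ≤ v then (st.1, PySem.List.pySetD st.2.1 v (PySem.List.pyGetD st.2.1 v 0 + 1), st.2.2)
    else st

def brpPrefOk (cb : List Int) : List Int → Int → Bool
  | [], _ => true
  | v :: vs, pb =>
    let pb' := pb + PySem.List.pyGetD cb v 0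
    if v < pb' then false else brpPrefOk cb vs pb'

def brpSufOk (cr : List Int) (n : Int) : List Int → Int → Bool
  | [], _ => true
  | v :: vs, sr =>
    let sr' := sr + PySem.List.pyGetD cr (v + 1) 0
    if n - v < sr' then false else brpSufOk cr n vs sr'

def blue_red_permutation_alt (n : Int) (a : List Int) (s : String) : String :=
  let size : Int := max n 0 + 1
  let init : List Int × List Int × Int := (List.replicate size.toNat 0, List.replicate size.toNat 0, 0)
  let st := (PySem.List.pyRange 0 n 1).foldl (brpStep n a s.toList) init
  if 0 < st.2.2 then "NO"
  else if brpPrefOk st.1 (PySem.List.pyRange 1 size 1) 0 = false then "NO"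
  else if brpSufOk st.2.1 n (PySem.List.pyRange (n - 1) (-1) (-1)) 0 = false then "NO"
  else "YES"

-- ===== PRECONDITION & SPEC =====
-- Pre_ excludes exactly the inputs where A raises IndexError (an index 0 ≤ i < n beyond a or s).
def Pre_blue_red_permutation (n : Int) (a : List Int) (s : String) : Prop :=
  n ≤ PySem.List.len a ∧ n ≤ PySem.Str.len s
instance (n : Int) (a : List Int) (s : String) : Decidable (Pre_blue_red_permutation n a s) := by unfold Pre_blue_red_permutation; infer_instance

def pvWitness_blue_red_permutation : Int × List Int × String := (2, [2, 1], "BR")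

def Spec_blue_red_permutation (n : Int) (a : List Int) (s : String) (out : String) : Prop := out = blue_red_permutation_alt n a s
instance (n : Int) (a : List Int) (s : String) (out : String) : Decidable (Spec_blue_red_permutation n a s out) := by unfold Spec_blue_red_permutation; infer_instance

-- ===== CLAIM (what is proved, stated in full; the proofs are below) =====
def Claim_equal_blue_red_permutation : Prop := ∀ (n : Int) (a : List Int) (s : String), Dom_blue_red_permutation n a s → Pre_blue_red_permutation n a s → Spec_blue_red_permutation n a s (blue_red_permutation n a s)

-- ===== LEMMAS AND PROOFS =====

-- The blue / red value lists extracted from an index list l (shared shape of both ports' loops)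
def brpBluesL (a : List Int) (cs : List Char) (l : List Int) : List Int :=
  (l.filter (fun i => decide (PySem.List.pyGetD cs i ' ' = 'B'))).map (fun i => PySem.List.pyGetD a i 0)

def brpRedsL (a : List Int) (cs : List Char) (l : List Int) : List Int :=
  (l.filter (fun i => !decide (PySem.List.pyGetD cs i ' ' = 'B'))).map (fun i => PySem.List.pyGetD a i 0)

-- head-consuming version of A's pointer greedy (proof vehicle)
def brpGreedy2 : List Int → List Int → List Int → String
  | _, _, [] => "YES"
  | b, r, i :: t =>
    if 0 < b.length ∧ i ≤ b.headI then brpGreedy2 b.tail r t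
    else if 0 < r.length ∧ r.headI ≤ i then brpGreedy2 b r.tail t
    else "NO"

-- the common feasibility condition both programs decide
def brpC (n : Int) (blues reds : List Int) : Prop :=
  (∀ x ∈ blues, 1 ≤ x) ∧ (∀ x ∈ reds, x ≤ n) ∧
  (∀ v : Int, 1 ≤ v → v ≤ n → ((blues.countP (fun x => decide (x ≤ v)) : Int)) ≤ v) ∧
  (∀ v : Int, 0 ≤ v → v ≤ n - 1 → ((reds.countP (fun x => decide (v < x)) : Int)) ≤ n - v)

-- ---- partition fold (A's first loop) ----
lemma brp_partition (a : List Int) (cs : List Char) (l : List Int) :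
    ∀ (acc1 acc2 : List Int),
      l.foldl (fun (p : List Int × List Int) i =>
        if PySem.List.pyGetD cs i ' ' = 'B' then
          (p.1 ++ [PySem.List.pyGetD a i 0], p.2)
        else
          (p.1, p.2 ++ [PySem.List.pyGetD a i 0])) (acc1, acc2)
      = (acc1 ++ brpBluesL a cs l, acc2 ++ brpRedsL a cs l) := by
  induction l with
  | nil => intro acc1 acc2; simp [brpBluesL, brpRedsL]
  | cons i l ih =>
    intro acc1 acc2
    by_cases h : PySem.List.pyGetD cs i ' ' = 'B'
    · simp only [List.foldl_cons, if_pos h]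
      rw [ih]
      simp [brpBluesL, brpRedsL, h]
    · simp only [List.foldl_cons, if_neg h]
      rw [ih]
      simp [brpBluesL, brpRedsL, h]

-- ---- pointer greedy = consuming greedy ----
lemma brpGreedy_eq_greedy2 (b r : List Int) :
    ∀ (t : List Int) (p q : Nat), p ≤ b.length → q ≤ r.length →
      brpGreedy b r t (p : Int) (q : Int) = brpGreedy2 (b.drop p) (r.drop q) t := by
  intro t
  induction t with
  | nil => intro p q hp hq; rfl
  | cons i t ih =>
    intro p q hp hq
    simp only [brpGreedy, brpGreedy2]
    have redstep : (if (q : Int) < PySem.List.len r ∧ PySem.List.pyGetD r (q : Int) 0 ≤ i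
          then brpGreedy b r t (p : Int) ((q : Int) + 1) else "NO")
        = (if 0 < (r.drop q).length ∧ (r.drop q).headI ≤ i
          then brpGreedy2 (b.drop p) (r.drop q).tail t else "NO") := by
      by_cases hqr : q < r.length
      · have hdropr : r.drop q = r[q] :: r.drop (q + 1) := List.drop_eq_getElem_cons hqr
        have hgr : PySem.List.pyGetD r (q : Int) 0 = r[q] := by
          rw [PySem.List.pyGetD_natCast, List.getD_eq_getElem _ _ hqr]
        have e3 : ((q : Int) < PySem.List.len r ∧ PySem.List.pyGetD r (q : Int) 0 ≤ i) ↔ r[q] ≤ i :=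
          ⟨fun h => by rw [← hgr]; exact h.2,
           fun h => ⟨by simp only [PySem.List.len_eq]; exact_mod_cast hqr, by rw [hgr]; exact h⟩⟩
        have e4 : (0 < (r.drop q).length ∧ (r.drop q).headI ≤ i) ↔ r[q] ≤ i := by
          rw [hdropr]; simp only [List.headI_cons, List.length_cons]
          exact ⟨fun h => h.2, fun h => ⟨by omega, h⟩⟩
        simp only [e3, e4]
        by_cases hcr : r[q] ≤ i
        · rw [if_pos hcr, if_pos hcr, List.tail_drop,
              show ((q : Int) + 1) = ((q + 1 : Nat) : Int) by push_cast; ring]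
          exact ih p (q + 1) hp (by omega)
        · rw [if_neg hcr, if_neg hcr]
      · have hq' : (r.drop q).length = 0 := by simp; omega
        rw [if_neg (by rintro ⟨h1, -⟩; simp only [PySem.List.len_eq] at h1; omega),
            if_neg (by rintro ⟨h1, -⟩; omega)]
    by_cases hpb : p < b.length
    · have hdropb : b.drop p = b[p] :: b.drop (p + 1) := List.drop_eq_getElem_cons hpb
      have hgb : PySem.List.pyGetD b (p : Int) 0 = b[p] := by
        rw [PySem.List.pyGetD_natCast, List.getD_eq_getElem _ _ hpb]
      have e1 : ((p : Int) < PySem.List.len b ∧ i ≤ PySem.List.pyGetD b (p : Int) 0) ↔ i ≤ b[p] :=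
        ⟨fun h => by rw [← hgb]; exact h.2,
         fun h => ⟨by simp only [PySem.List.len_eq]; exact_mod_cast hpb, by rw [hgb]; exact h⟩⟩
      have e2 : (0 < (b.drop p).length ∧ i ≤ (b.drop p).headI) ↔ i ≤ b[p] := by
        rw [hdropb]; simp only [List.headI_cons, List.length_cons]
        exact ⟨fun h => h.2, fun h => ⟨by omega, h⟩⟩
      simp only [e1, e2]
      by_cases hc : i ≤ b[p]
      · rw [if_pos hc, if_pos hc, List.tail_drop,
            show ((p : Int) + 1) = ((p + 1 : Nat) : Int) by push_cast; ring]
        exact ih (p + 1) q (by omega) hq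
      · rw [if_neg hc, if_neg hc]
        exact redstep
    · have e1 : ¬((p : Int) < PySem.List.len b ∧ i ≤ PySem.List.pyGetD b (p : Int) 0) := by
        rintro ⟨h1, -⟩; simp only [PySem.List.len_eq] at h1; omega
      have e2 : ¬(0 < (b.drop p).length ∧ i ≤ (b.drop p).headI) := by
        rintro ⟨h1, -⟩; simp at h1; omega
      rw [if_neg e1, if_neg e2]
      exact redstep

-- ---- greedy characterization ----
lemma brpGreedy2_stuck :
    ∀ (c : Nat) (i hb : Int) (b' r : List Int), hb < i → b'.length + 1 + r.length = c →
      brpGreedy2 (hb :: b') r (PySem.List.pyRange i (i + c) 1) = "NO" := by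
  intro c
  induction c with
  | zero => intro i hb b' r hlt hlen; omega
  | succ c ih =>
    intro i hb b' r hlt hlen
    rw [PySem.List.pyRange_one_cons (by push_cast; omega)]
    simp only [brpGreedy2]
    rw [if_neg (by rintro ⟨-, h2⟩; simp only [List.headI_cons] at h2; omega)]
    have harg : i + ((c + 1 : Nat) : Int) = (i + 1) + (c : Int) := by push_cast; ring
    cases r with
    | nil => rw [if_neg (by rintro ⟨h1, -⟩; simp at h1)]
    | cons hr r' =>
      by_cases hcr : hr ≤ i
      · rw [if_pos ⟨by simp, by simpa using hcr⟩]
        simp only [List.tail_cons]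
        rw [harg]
        exact ih (i + 1) hb b' r' (by omega) (by simp at hlen; omega)
      · rw [if_neg (by rintro ⟨-, h2⟩; simp only [List.headI_cons] at h2; omega)]

lemma brpGreedy2_iff :
    ∀ (c : Nat) (i : Int) (b r : List Int), b.length + r.length = c →
      (brpGreedy2 b r (PySem.List.pyRange i (i + c) 1) = "YES" ↔
        (∀ (j : Nat) (h : j < b.length), i + j ≤ b[j]) ∧
        (∀ (j : Nat) (h : j < r.length), r[j] ≤ i + b.length + j)) := by
  intro c
  induction c with
  | zero =>
    intro i b r hlen
    cases b with
    | cons x b' => simp at hlen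
    | nil =>
    cases r with
    | cons x r' => simp at hlen
    | nil =>
      rw [show i + ((0 : Nat) : Int) = i from by simp, PySem.List.pyRange_one_eq_nil (le_refl i)]
      exact ⟨fun _ => ⟨by intro j hj; simp at hj, by intro j hj; simp at hj⟩, fun _ => rfl⟩
  | succ c ih =>
    intro i b r hlen
    have hcons : PySem.List.pyRange i (i + ((c + 1 : Nat) : Int)) 1
        = i :: PySem.List.pyRange (i + 1) ((i + 1) + (c : Int)) 1 := by
      rw [PySem.List.pyRange_one_cons (by push_cast; omega)]
      congr 1
      push_cast; ring
    cases b with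
    | cons hbv b' =>
      by_cases hc : i ≤ hbv
      · rw [hcons]
        simp only [brpGreedy2, List.tail_cons]
        rw [if_pos ⟨by simp, by simpa using hc⟩]
        rw [show (i + 1) + (c : Int) = (i + 1) + ((c : Nat) : Int) from by norm_num,
            ih (i + 1) b' r (by simp at hlen; omega)]
        constructor
        · rintro ⟨h1, h2⟩
          refine ⟨?_, ?_⟩
          · intro j hj
            cases j with
            | zero => simpa using hc
            | succ j =>
              have := h1 j (by simp at hj; omega)
              simp only [List.getElem_cons_succ]
              push_cast at this ⊢; omega
          · intro j hj
            have := h2 j hj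
            simp only [List.length_cons]
            push_cast at this ⊢; omega
        · rintro ⟨h1, h2⟩
          refine ⟨?_, ?_⟩
          · intro j hj
            have := h1 (j + 1) (by simp; omega)
            simp only [List.getElem_cons_succ] at this
            push_cast at this ⊢; omega
          · intro j hj
            have := h2 j hj
            simp only [List.length_cons] at this
            push_cast at this ⊢; omega
      · have hno := brpGreedy2_stuck (c + 1) i hbv b' r (by omega) (by simp at hlen; omega)
        rw [hno]
        constructor
        · intro h; exact absurd h (by decide)
        · rintro ⟨h1, -⟩
          have := h1 0 (by simp)
          simp at this; omega
    | nil =>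
      rw [hcons]
      cases r with
      | nil => simp at hlen
      | cons hrv r' =>
        simp only [brpGreedy2, List.tail_cons]
        rw [if_neg (by rintro ⟨h1, -⟩; simp at h1)]
        by_cases hcr : hrv ≤ i
        · rw [if_pos ⟨by simp, by simpa using hcr⟩]
          rw [show (i + 1) + (c : Int) = (i + 1) + ((c : Nat) : Int) from by norm_num,
              ih (i + 1) [] r' (by simp only [List.length_nil, List.length_cons] at hlen ⊢; omega)]
          constructor
          · rintro ⟨-, h2⟩
            refine ⟨by intro j hj; simp at hj, ?_⟩
            intro j hj
            cases j with
            | zero =>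
              simp only [List.getElem_cons_zero, List.length_nil]
              push_cast; omega
            | succ j =>
              have := h2 j (by simp at hj; omega)
              simp only [List.getElem_cons_succ, List.length_nil] at this ⊢
              push_cast at this ⊢; omega
          · rintro ⟨-, h2⟩
            refine ⟨by intro j hj; simp at hj, ?_⟩
            intro j hj
            have := h2 (j + 1) (by simp; omega)
            simp only [List.getElem_cons_succ, List.length_nil] at this ⊢
            push_cast at this ⊢; omega
        · rw [if_neg (by rintro ⟨-, h2⟩; simp only [List.headI_cons] at h2; omega)]
          constructor
          · intro h; exact absurd h (by decide)
          · rintro ⟨-, h2⟩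
            have := h2 0 (by simp)
            simp at this; omega

lemma brpGreedy2_cases : ∀ (t b r : List Int),
    brpGreedy2 b r t = "YES" ∨ brpGreedy2 b r t = "NO" := by
  intro t
  induction t with
  | nil => intro b r; left; rfl
  | cons i t ih =>
    intro b r
    simp only [brpGreedy2]
    split_ifs
    · exact ih _ _
    · exact ih _ _
    · right; rfl

-- ---- sorted prefix counting ----
lemma brp_countP_le_eq_takeWhile (b : List Int) (v : Int) (hs : b.Pairwise (· ≤ ·)) :
    b.countP (fun x => decide (x ≤ v)) = (b.takeWhile (fun x => decide (x ≤ v))).length := by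
  induction b with
  | nil => rfl
  | cons x b ih =>
    rw [List.pairwise_cons] at hs
    obtain ⟨hx, hb⟩ := hs
    by_cases h : x ≤ v
    · rw [List.countP_cons_of_pos (by simpa using h), List.takeWhile_cons_of_pos (by simpa using h)]
      simp [ih hb]
    · rw [List.countP_cons_of_neg (by simpa using h), List.takeWhile_cons_of_neg (by simpa using h)]
      simp only [List.length_nil]
      rw [List.countP_eq_zero.mpr]
      intro y hy
      have := hx y hy
      simp only [decide_eq_true_eq]
      omega

lemma brp_sorted_le_iff (b : List Int) (v : Int) (hs : b.Pairwise (· ≤ ·))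
    (j : Nat) (hj : j < b.length) :
    b[j] ≤ v ↔ j < b.countP (fun x => decide (x ≤ v)) := by
  rw [brp_countP_le_eq_takeWhile b v hs]
  have hmono := List.pairwise_iff_getElem.mp hs
  set p : Int → Bool := fun x => decide (x ≤ v) with hp
  set tw := b.takeWhile p with htw_def
  set dw := b.dropWhile p with hdw_def
  have hsp : tw ++ dw = b := List.takeWhile_append_dropWhile
  constructor
  · intro hle
    by_contra hge
    push Not at hge
    have htwlt : tw.length < b.length := lt_of_le_of_lt hge hj
    have hdw : dw ≠ [] := by
      intro hnil
      rw [hnil, List.append_nil] at hsp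
      have := congrArg List.length hsp
      omega
    have hdrop : b.drop tw.length = dw := by
      conv_lhs => rw [← hsp]
      exact List.drop_left
    have hsome : dw.head? = some (b[tw.length]'htwlt) := by
      rw [← hdrop, List.head?_drop]
      exact List.getElem?_eq_getElem htwlt
    have hheadeq : dw.head hdw = b[tw.length]'htwlt := by
      rw [List.head?_eq_some_head hdw] at hsome
      exact Option.some.inj hsome
    have hfailb : ¬ (b[tw.length]'htwlt ≤ v) := by
      intro hcon
      have hnp := List.head_dropWhile_not p hdw
      rw [hheadeq] at hnp
      simp only [hp, decide_eq_false_iff_not] at hnp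
      exact hnp hcon
    rcases eq_or_lt_of_le hge with heq | hlt
    · exact hfailb (by simp only [heq]; exact hle)
    · exact hfailb (le_trans (hmono tw.length j htwlt hj hlt) hle)
  · intro hcnt
    have hpre := List.takeWhile_prefix (l := b) p
    have hmem := List.mem_takeWhile_imp (List.getElem_mem hcnt)
    rw [hpre.getElem hcnt] at hmem
    simpa [hp] using hmem

-- ---- index conditions ↔ count conditions, on sorted lists ----
lemma brp_blue_iff (n : Int) (b : List Int) (hs : b.Pairwise (· ≤ ·))
    (hlen : (b.length : Int) ≤ n) :
    (∀ (j : Nat) (h : j < b.length), 1 + (j : Int) ≤ b[j]) ↔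
      ((∀ x ∈ b, 1 ≤ x) ∧
       ∀ v : Int, 1 ≤ v → v ≤ n → ((b.countP (fun x => decide (x ≤ v)) : Int)) ≤ v) := by
  constructor
  · intro hidx
    refine ⟨?_, ?_⟩
    · intro x hx
      obtain ⟨j, hj, rfl⟩ := List.mem_iff_getElem.mp hx
      have := hidx j hj
      omega
    · intro v h1 hv
      by_contra hgt
      push Not at hgt
      have hcl : b.countP (fun x => decide (x ≤ v)) ≤ b.length := List.countP_le_length
      have hvb : v.toNat < b.length := by omega
      have hle := (brp_sorted_le_iff b v hs v.toNat hvb).mpr (by omega)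
      have := hidx v.toNat hvb
      omega
  · rintro ⟨hall, hcnt⟩ j hj
    by_contra hlt
    push Not at hlt
    rcases Nat.eq_zero_or_pos j with h0 | hpos
    · subst h0
      have := hall b[0] (List.getElem_mem hj)
      simp at hlt
      omega
    · have hv := hcnt (j : Int) (by omega) (by omega)
      have := (brp_sorted_le_iff b (j : Int) hs j hj).mp (by omega)
      omega

lemma brp_countP_compl (r : List Int) (v : Int) :
    (r.countP (fun x => decide (v < x)) : Int)
      = (r.length : Int) - (r.countP (fun x => decide (x ≤ v)) : Int) := by
  have hsum := List.length_eq_countP_add_countP (p := fun x : Int => decide (x ≤ v)) (l := r)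
  have hcongr : r.countP (fun x => decide (v < x))
      = r.countP (fun x : Int => decide ¬(decide (x ≤ v)) = true) := by
    apply List.countP_congr
    intro x _
    simp only [decide_eq_true_eq]
    omega
  rw [hcongr]
  omega

lemma brp_red_iff (n : Int) (m : Nat) (r : List Int) (hs : r.Pairwise (· ≤ ·))
    (hlen : (m : Int) + r.length = n) :
    (∀ (j : Nat) (h : j < r.length), r[j] ≤ 1 + (m : Int) + j) ↔
      ((∀ x ∈ r, x ≤ n) ∧
       ∀ v : Int, 0 ≤ v → v ≤ n - 1 → ((r.countP (fun x => decide (v < x)) : Int)) ≤ n - v) := by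
  constructor
  · intro hidx
    refine ⟨?_, ?_⟩
    · intro x hx
      obtain ⟨j, hj, rfl⟩ := List.mem_iff_getElem.mp hx
      have := hidx j hj
      omega
    · intro v h0 hv
      rw [brp_countP_compl]
      by_cases hvm : v ≤ (m : Int)
      · have : (0 : Int) ≤ r.countP (fun x => decide (x ≤ v)) := by positivity
        omega
      · push Not at hvm
        have hj0 : (v - m - 1).toNat < r.length := by omega
        have hle : r[(v - m - 1).toNat] ≤ v := by
          have := hidx (v - m - 1).toNat hj0
          omega
        have := (brp_sorted_le_iff r v hs (v - m - 1).toNat hj0).mp hle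
        omega
  · rintro ⟨hall, hcnt⟩ j hj
    by_cases hlast : j + 1 = r.length
    · have := hall r[j] (List.getElem_mem hj)
      omega
    · have hv := hcnt (1 + (m : Int) + j) (by omega) (by omega)
      rw [brp_countP_compl] at hv
      exact (brp_sorted_le_iff r (1 + (m : Int) + j) hs j hj).mpr (by omega)

-- ---- A decided by brpC ----
lemma brp_A_iff (n : Int) (a : List Int) (s : String) (hn : 0 ≤ n) :
    (blue_red_permutation n a s = "YES" ↔
      brpC n (brpBluesL a s.toList (PySem.List.pyRange 0 n 1))
             (brpRedsL a s.toList (PySem.List.pyRange 0 n 1))) ∧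
    (blue_red_permutation n a s = "YES" ∨ blue_red_permutation n a s = "NO") := by
  have hA : blue_red_permutation n a s
      = brpGreedy2
          (PySem.List.sorted (brpBluesL a s.toList (PySem.List.pyRange 0 n 1)) (fun x => x) false)
          (PySem.List.sorted (brpRedsL a s.toList (PySem.List.pyRange 0 n 1)) (fun x => x) false)
          (PySem.List.pyRange 1 (n + 1) 1) := by
    simp only [blue_red_permutation, brp_partition a s.toList (PySem.List.pyRange 0 n 1) [] [],
               List.nil_append]
    rw [PySem.List.sorted_eq_of_perm_of_pairwise_lt _ _ _ (List.Perm.refl _)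
          (PySem.List.pairwise_lt_pyRange_one 1 (n + 1))]
    simpa using brpGreedy_eq_greedy2
      (PySem.List.sorted (brpBluesL a s.toList (PySem.List.pyRange 0 n 1)) (fun x => x) false)
      (PySem.List.sorted (brpRedsL a s.toList (PySem.List.pyRange 0 n 1)) (fun x => x) false)
      (PySem.List.pyRange 1 (n + 1) 1) 0 0 (Nat.zero_le _) (Nat.zero_le _)
  set blues := brpBluesL a s.toList (PySem.List.pyRange 0 n 1) with hblues
  set reds := brpRedsL a s.toList (PySem.List.pyRange 0 n 1) with hreds
  set sb := PySem.List.sorted blues (fun x => x) false with hsb_def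
  set sr := PySem.List.sorted reds (fun x => x) false with hsr_def
  have hperm_b : sb.Perm blues := PySem.List.sorted_perm blues (fun x => x) false
  have hperm_r : sr.Perm reds := PySem.List.sorted_perm reds (fun x => x) false
  have hlen : blues.length + reds.length = n.toNat := by
    rw [hblues, hreds]
    unfold brpBluesL brpRedsL
    simp only [List.length_map]
    have := (List.length_eq_length_filter_add
      (l := PySem.List.pyRange 0 n 1)
      (fun i : Int => decide (PySem.List.pyGetD s.toList i ' ' = 'B'))).symm
    rw [this, PySem.List.length_pyRange_one]
    omega
  refine ⟨?_, ?_⟩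
  · rw [hA]
    have hiff := brpGreedy2_iff n.toNat 1 sb sr
      (by rw [hperm_b.length_eq, hperm_r.length_eq]; exact hlen)
    rw [show (1 : Int) + ((n.toNat : Nat) : Int) = n + 1 from by omega] at hiff
    rw [hiff]
    have hsb' : sb.Pairwise (· ≤ ·) := PySem.List.sorted_pairwise blues (fun x => x)
    have hsr' : sr.Pairwise (· ≤ ·) := PySem.List.sorted_pairwise reds (fun x => x)
    have hblen : (sb.length : Int) ≤ n := by
      rw [hperm_b.length_eq]; omega
    have hrlen : ((sb.length : Nat) : Int) + sr.length = n := by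
      rw [hperm_b.length_eq, hperm_r.length_eq]; omega
    rw [brp_blue_iff n sb hsb' hblen, brp_red_iff n sb.length sr hsr' hrlen]
    unfold brpC
    constructor
    · rintro ⟨⟨mb, cb⟩, mr, cr⟩
      exact ⟨fun x hx => mb x (hperm_b.mem_iff.mpr hx),
             fun x hx => mr x (hperm_r.mem_iff.mpr hx),
             fun v h1 h2 => by rw [← hperm_b.countP_eq]; exact cb v h1 h2,
             fun v h1 h2 => by rw [← hperm_r.countP_eq]; exact cr v h1 h2⟩
    · rintro ⟨mb, mr, cb, cr⟩
      exact ⟨⟨fun x hx => mb x (hperm_b.mem_iff.mp hx),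
              fun v h1 h2 => by rw [hperm_b.countP_eq]; exact cb v h1 h2⟩,
             fun x hx => mr x (hperm_r.mem_iff.mp hx),
             fun v h1 h2 => by rw [hperm_r.countP_eq]; exact cr v h1 h2⟩
  · rw [hA]
    exact brpGreedy2_cases _ _ _

-- ---- B's counting fold ----
lemma brp_getD_set (l : List Int) (v w x : Int) (hv : 0 ≤ v) (hw : 0 ≤ w)
    (hvl : v.toNat < l.length) :
    PySem.List.pyGetD (PySem.List.pySetD l v x) w 0
      = if w = v then x else PySem.List.pyGetD l w 0 := by
  rw [PySem.List.pySetD_of_nonneg l x hv, PySem.List.pyGetD_of_nonneg _ 0 hw,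
      PySem.List.pyGetD_of_nonneg _ 0 hw]
  by_cases h : w = v
  · subst h
    rw [if_pos rfl, List.getD_eq_getElem?_getD]
    simp only [List.length_set, hvl, getElem?_pos, List.getElem_set_self, Option.getD_some]
  · rw [if_neg h, List.getD_eq_getElem?_getD, List.getD_eq_getElem?_getD,
        List.getElem?_set_ne (by omega)]

-- ---- B's counting fold ----
lemma brp_count_fold (n : Int) (a : List Int) (cs : List Char) :
    ∀ (l : List Int) (cb cr : List Int) (bad : Int),
      cb.length = n.toNat + 1 → cr.length = n.toNat + 1 →
      (l.foldl (brpStep n a cs) (cb, cr, bad)).1.length = n.toNat + 1 ∧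
      (l.foldl (brpStep n a cs) (cb, cr, bad)).2.1.length = n.toNat + 1 ∧
      (∀ v : Int, 1 ≤ v → v ≤ n →
        PySem.List.pyGetD (l.foldl (brpStep n a cs) (cb, cr, bad)).1 v 0
          = PySem.List.pyGetD cb v 0 + ((brpBluesL a cs l).count v : Int)) ∧
      (∀ v : Int, 1 ≤ v → v ≤ n →
        PySem.List.pyGetD (l.foldl (brpStep n a cs) (cb, cr, bad)).2.1 v 0
          = PySem.List.pyGetD cr v 0 + ((brpRedsL a cs l).count v : Int)) ∧
      (l.foldl (brpStep n a cs) (cb, cr, bad)).2.2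
        = bad + ((brpBluesL a cs l).countP (fun x => decide (x < 1)) : Int)
              + ((brpRedsL a cs l).countP (fun x => decide (n < x)) : Int) := by
  intro l
  induction l with
  | nil =>
    intro cb cr bad hcb hcr
    refine ⟨hcb, hcr, ?_, ?_, ?_⟩ <;> simp [brpBluesL, brpRedsL]
  | cons i l ih =>
    intro cb cr bad hcb hcr
    simp only [List.foldl_cons, brpStep]
    by_cases hB : PySem.List.pyGetD cs i ' ' = 'B'
    · have hbl : brpBluesL a cs (i :: l) = PySem.List.pyGetD a i 0 :: brpBluesL a cs l := by
        simp [brpBluesL, hB]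
      have hrl : brpRedsL a cs (i :: l) = brpRedsL a cs l := by
        simp [brpRedsL, hB]
      rw [if_pos hB]
      by_cases hv1 : PySem.List.pyGetD a i 0 < 1
      · rw [if_pos hv1]
        obtain ⟨L1, L2, C1, C2, B⟩ := ih cb cr (bad + 1) hcb hcr
        refine ⟨L1, L2, ?_, ?_, ?_⟩
        · intro v h1 h2
          rw [C1 v h1 h2, hbl]
          simp [List.count_cons]; omega
        · intro v h1 h2
          rw [C2 v h1 h2, hrl]
        · rw [B, hbl, hrl]
          simp [List.countP_cons]; omega
      · rw [if_neg hv1]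
        by_cases hvn : PySem.List.pyGetD a i 0 ≤ n
        · rw [if_pos hvn]
          have hlen' : (PySem.List.pySetD cb (PySem.List.pyGetD a i 0)
              (PySem.List.pyGetD cb (PySem.List.pyGetD a i 0) 0 + 1)).length = n.toNat + 1 := by
            rw [PySem.List.pySetD_of_nonneg _ _ (by omega), List.length_set]
            exact hcb
          obtain ⟨L1, L2, C1, C2, B⟩ := ih _ cr bad hlen' hcr
          refine ⟨L1, L2, ?_, ?_, ?_⟩
          · intro v h1 h2
            rw [C1 v h1 h2, brp_getD_set cb (PySem.List.pyGetD a i 0) v (PySem.List.pyGetD cb (PySem.List.pyGetD a i 0) 0 + 1) (by omega) (by omega) (by omega), hbl]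
            by_cases h : v = PySem.List.pyGetD a i 0
            · rw [if_pos h]
              simp [h]; omega
            · rw [if_neg h]
              simp [List.count_cons]; omega
          · intro v h1 h2
            rw [C2 v h1 h2, hrl]
          · rw [B, hbl, hrl]
            simp [List.countP_cons]; omega
        · rw [if_neg hvn]
          obtain ⟨L1, L2, C1, C2, B⟩ := ih cb cr bad hcb hcr
          refine ⟨L1, L2, ?_, ?_, ?_⟩
          · intro v h1 h2
            rw [C1 v h1 h2, hbl]
            simp [List.count_cons]; omega
          · intro v h1 h2
            rw [C2 v h1 h2, hrl]
          · rw [B, hbl, hrl]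
            simp [List.countP_cons]; omega
    · have hbl : brpBluesL a cs (i :: l) = brpBluesL a cs l := by
        simp [brpBluesL, hB]
      have hrl : brpRedsL a cs (i :: l) = PySem.List.pyGetD a i 0 :: brpRedsL a cs l := by
        simp [brpRedsL, hB]
      rw [if_neg hB]
      by_cases hvn : n < PySem.List.pyGetD a i 0
      · rw [if_pos hvn]
        obtain ⟨L1, L2, C1, C2, B⟩ := ih cb cr (bad + 1) hcb hcr
        refine ⟨L1, L2, ?_, ?_, ?_⟩
        · intro v h1 h2
          rw [C1 v h1 h2, hbl]
        · intro v h1 h2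
          rw [C2 v h1 h2, hrl]
          simp [List.count_cons]; omega
        · rw [B, hbl, hrl]
          simp [List.countP_cons]; omega
      · rw [if_neg hvn]
        by_cases hv1 : 1 ≤ PySem.List.pyGetD a i 0
        · rw [if_pos hv1]
          have hlen' : (PySem.List.pySetD cr (PySem.List.pyGetD a i 0)
              (PySem.List.pyGetD cr (PySem.List.pyGetD a i 0) 0 + 1)).length = n.toNat + 1 := by
            rw [PySem.List.pySetD_of_nonneg _ _ (by omega), List.length_set]
            exact hcr
          obtain ⟨L1, L2, C1, C2, B⟩ := ih cb _ bad hcb hlen'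
          refine ⟨L1, L2, ?_, ?_, ?_⟩
          · intro v h1 h2
            rw [C1 v h1 h2, hbl]
          · intro v h1 h2
            rw [C2 v h1 h2, brp_getD_set cr (PySem.List.pyGetD a i 0) v (PySem.List.pyGetD cr (PySem.List.pyGetD a i 0) 0 + 1) (by omega) (by omega) (by omega), hrl]
            by_cases h : v = PySem.List.pyGetD a i 0
            · rw [if_pos h]
              simp [h]; omega
            · rw [if_neg h]
              simp [List.count_cons]; omega
          · rw [B, hbl, hrl]
            simp [List.countP_cons]; omega
        · rw [if_neg hv1]
          obtain ⟨L1, L2, C1, C2, B⟩ := ih cb cr bad hcb hcr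
          refine ⟨L1, L2, ?_, ?_, ?_⟩
          · intro v h1 h2
            rw [C1 v h1 h2, hbl]
          · intro v h1 h2
            rw [C2 v h1 h2, hrl]
            simp [List.count_cons]; omega
          · rw [B, hbl, hrl]
            simp [List.countP_cons]; omega

-- ---- B's two check loops ----
lemma brpPrefOk_iff (cb : List Int) :
    ∀ (c : Nat) (lo : Int) (acc : Int),
      (brpPrefOk cb (PySem.List.pyRange lo (lo + c) 1) acc = true ↔
        ∀ v : Int, lo ≤ v → v < lo + c →
          acc + ((PySem.List.pyRange lo (v + 1) 1).map (fun w => PySem.List.pyGetD cb w 0)).sum ≤ v) := by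
  intro c
  induction c with
  | zero =>
    intro lo acc
    rw [show lo + ((0 : Nat) : Int) = lo from by simp, PySem.List.pyRange_one_eq_nil (le_refl lo)]
    exact ⟨fun _ v h1 h2 => by omega, fun _ => rfl⟩
  | succ c ih =>
    intro lo acc
    have hcons : PySem.List.pyRange lo (lo + ((c + 1 : Nat) : Int)) 1
        = lo :: PySem.List.pyRange (lo + 1) ((lo + 1) + ((c : Nat) : Int)) 1 := by
      rw [PySem.List.pyRange_one_cons (by push_cast; omega)]
      congr 1
      push_cast; ring
    rw [hcons]
    simp only [brpPrefOk]
    by_cases hstop : lo < acc + PySem.List.pyGetD cb lo 0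
    · rw [if_pos hstop]
      constructor
      · intro h; exact absurd h (by decide)
      · intro h
        have := h lo (le_refl lo) (by push_cast; omega)
        rw [PySem.List.pyRange_one_singleton] at this
        simp at this
        omega
    · rw [if_neg hstop, ih (lo + 1) (acc + PySem.List.pyGetD cb lo 0)]
      constructor
      · intro h v hv1 hv2
        have hsplit : ((PySem.List.pyRange lo (v + 1) 1).map (fun w => PySem.List.pyGetD cb w 0)).sum
            = PySem.List.pyGetD cb lo 0
              + ((PySem.List.pyRange (lo + 1) (v + 1) 1).map (fun w => PySem.List.pyGetD cb w 0)).sum := by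
          rw [PySem.List.pyRange_one_cons (by omega)]
          simp
        rcases eq_or_lt_of_le hv1 with heq | hlt
        · rw [← heq, PySem.List.pyRange_one_singleton]
          simp
          omega
        · have := h v (by omega) (by push_cast at hv2 ⊢; omega)
          rw [hsplit]
          omega
      · intro h v hv1 hv2
        have hsplit : ((PySem.List.pyRange lo (v + 1) 1).map (fun w => PySem.List.pyGetD cb w 0)).sum
            = PySem.List.pyGetD cb lo 0
              + ((PySem.List.pyRange (lo + 1) (v + 1) 1).map (fun w => PySem.List.pyGetD cb w 0)).sum := by
          rw [PySem.List.pyRange_one_cons (by omega)]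
          simp
        have := h v (by omega) (by push_cast at hv2 ⊢; omega)
        rw [hsplit] at this
        omega

lemma brpSufOk_iff (cr : List Int) (n : Int) :
    ∀ (c : Nat) (a0 : Int) (acc : Int),
      (brpSufOk cr n (PySem.List.pyRange a0 (a0 - c) (-1)) acc = true ↔
        ∀ v : Int, a0 - c < v → v ≤ a0 →
          acc + ((PySem.List.pyRange (v + 1) (a0 + 2) 1).map (fun u => PySem.List.pyGetD cr u 0)).sum ≤ n - v) := by
  intro c
  induction c with
  | zero =>
    intro a0 acc
    rw [show a0 - ((0 : Nat) : Int) = a0 from by simp, PySem.List.pyRange_neg_one_eq_nil (le_refl a0)]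
    exact ⟨fun _ v h1 h2 => by omega, fun _ => rfl⟩
  | succ c ih =>
    intro a0 acc
    have hcons : PySem.List.pyRange a0 (a0 - ((c + 1 : Nat) : Int)) (-1)
        = a0 :: PySem.List.pyRange (a0 - 1) ((a0 - 1) - ((c : Nat) : Int)) (-1) := by
      rw [PySem.List.pyRange_neg_one_cons (by push_cast; omega)]
      congr 1
      push_cast; ring
    rw [hcons]
    simp only [brpSufOk]
    by_cases hstop : n - a0 < acc + PySem.List.pyGetD cr (a0 + 1) 0
    · rw [if_pos hstop]
      constructor
      · intro h; exact absurd h (by decide)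
      · intro h
        have := h a0 (by push_cast; omega) (le_refl a0)
        rw [show a0 + 2 = (a0 + 1) + 1 from by ring, PySem.List.pyRange_one_singleton] at this
        simp at this
        omega
    · rw [if_neg hstop, ih (a0 - 1) (acc + PySem.List.pyGetD cr (a0 + 1) 0)]
      constructor
      · intro h v hv1 hv2
        have hsplit : ((PySem.List.pyRange (v + 1) (a0 + 2) 1).map (fun u => PySem.List.pyGetD cr u 0)).sum
            = ((PySem.List.pyRange (v + 1) (a0 + 1) 1).map (fun u => PySem.List.pyGetD cr u 0)).sum
              + PySem.List.pyGetD cr (a0 + 1) 0 := by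
          rw [show a0 + 2 = (a0 + 1) + 1 from by ring,
              PySem.List.pyRange_one_succ_right (by omega)]
          simp
        rcases eq_or_lt_of_le hv2 with heq | hlt
        · rw [heq, show a0 + 2 = (a0 + 1) + 1 from by ring, PySem.List.pyRange_one_singleton]
          simp
          omega
        · have := h v (by push_cast at hv1 ⊢; omega) (by omega)
          rw [show a0 - 1 + 2 = a0 + 1 from by ring] at this
          rw [hsplit]
          omega
      · intro h v hv1 hv2
        have hsplit : ((PySem.List.pyRange (v + 1) (a0 + 2) 1).map (fun u => PySem.List.pyGetD cr u 0)).sum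
            = ((PySem.List.pyRange (v + 1) (a0 + 1) 1).map (fun u => PySem.List.pyGetD cr u 0)).sum
              + PySem.List.pyGetD cr (a0 + 1) 0 := by
          rw [show a0 + 2 = (a0 + 1) + 1 from by ring,
              PySem.List.pyRange_one_succ_right (by omega)]
          simp
        have := h v (by push_cast at hv1 ⊢; omega) (by omega)
        rw [hsplit] at this
        rw [show a0 - 1 + 2 = a0 + 1 from by ring]
        omega

-- ---- sum of per-value counts over a range = countP of the interval ----
lemma brp_sum_counts (xs : List Int) :
    ∀ (lo hi : Int),
      ((PySem.List.pyRange lo hi 1).map (fun w => (xs.count w : Int))).sum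
        = (xs.countP (fun x => decide (lo ≤ x ∧ x ≤ hi - 1)) : Int) := by
  intro lo hi
  induction xs with
  | nil => simp
  | cons x xs ih =>
    have hmapeq : (PySem.List.pyRange lo hi 1).map (fun w => (((x :: xs).count w : Nat) : Int))
        = (PySem.List.pyRange lo hi 1).map
            (fun w => ((xs.count w : Nat) : Int) + (if (fun w => w == x) w = true then 1 else 0)) := by
      apply List.map_congr_left
      intro w _
      by_cases h : x = w
      · simp [h]
      · simp [h, Ne.symm h]
    rw [hmapeq, PySem.List.sum_map_add_int, PySem.List.sum_map_ite_one_zero, ih,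
        ← List.count_eq_countP, List.Nodup.count (PySem.List.nodup_pyRange_one lo hi),
        List.countP_cons]
    by_cases hmem : lo ≤ x ∧ x ≤ hi - 1
    · rw [if_pos (PySem.List.mem_pyRange_one.mpr ⟨hmem.1, by omega⟩)]
      have hd : decide (lo ≤ x ∧ x ≤ hi - 1) = true := by simpa using hmem
      rw [hd]
      simp
    · rw [if_neg (fun hc => hmem (by have := PySem.List.mem_pyRange_one.mp hc; constructor <;> omega))]
      have hd : decide (lo ≤ x ∧ x ≤ hi - 1) = false := by simpa using hmem
      rw [hd]
      simp

-- ---- B decided by brpC ----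
lemma brp_B_iff (n : Int) (a : List Int) (s : String) (hn : 0 ≤ n) :
    (blue_red_permutation_alt n a s = "YES" ↔
      brpC n (brpBluesL a s.toList (PySem.List.pyRange 0 n 1))
             (brpRedsL a s.toList (PySem.List.pyRange 0 n 1))) ∧
    (blue_red_permutation_alt n a s = "YES" ∨ blue_red_permutation_alt n a s = "NO") := by
  have hmax : max n 0 = n := by omega
  have hrep : ∀ w : Int, 0 ≤ w → PySem.List.pyGetD (List.replicate (n + 1).toNat (0 : Int)) w 0 = 0 := by
    intro w hw
    rw [PySem.List.pyGetD_of_nonneg _ 0 hw, List.getD_eq_getElem?_getD, List.getElem?_replicate]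
    split <;> rfl
  simp only [blue_red_permutation_alt, hmax]
  set blues := brpBluesL a s.toList (PySem.List.pyRange 0 n 1) with hblues
  set reds := brpRedsL a s.toList (PySem.List.pyRange 0 n 1) with hreds
  set st := (PySem.List.pyRange 0 n 1).foldl (brpStep n a s.toList)
      (List.replicate (n + 1).toNat (0 : Int), List.replicate (n + 1).toNat (0 : Int), (0 : Int)) with hst
  obtain ⟨L1, L2, C1, C2, B⟩ := brp_count_fold n a s.toList (PySem.List.pyRange 0 n 1)
      (List.replicate (n + 1).toNat (0 : Int)) (List.replicate (n + 1).toNat (0 : Int)) 0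
      (by simp; omega) (by simp; omega)
  rw [← hst] at L1 L2 C1 C2 B
  rw [← hblues] at C1 B
  rw [← hreds] at C2 B
  refine ⟨?_, by split_ifs <;> simp⟩
  by_cases hbad : 0 < st.2.2
  · rw [if_pos hbad]
    constructor
    · intro h; exact absurd h (by decide)
    · rintro ⟨m1, m2, -, -⟩
      exfalso
      have h1 : blues.countP (fun x => decide (x < 1)) = 0 :=
        List.countP_eq_zero.mpr (fun x hx => by have := m1 x hx; simp; omega)
      have h2 : reds.countP (fun x => decide (n < x)) = 0 :=
        List.countP_eq_zero.mpr (fun x hx => by have := m2 x hx; simp; omega)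
      rw [B, h1, h2] at hbad
      simp at hbad
  · rw [if_neg hbad]
    have h1 : blues.countP (fun x => decide (x < 1)) = 0 := by omega
    have h2 : reds.countP (fun x => decide (n < x)) = 0 := by omega
    have m1 : ∀ x ∈ blues, 1 ≤ x := fun x hx => by
      have := List.countP_eq_zero.mp h1 x hx; simp at this; omega
    have m2 : ∀ x ∈ reds, x ≤ n := fun x hx => by
      have := List.countP_eq_zero.mp h2 x hx; simp at this; omega
    have hsum : ∀ v : Int, 1 ≤ v → v ≤ n →
        ((PySem.List.pyRange 1 (v + 1) 1).map (fun w => PySem.List.pyGetD st.1 w 0)).sum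
          = ((blues.countP (fun x => decide (x ≤ v)) : Nat) : Int) := by
      intro v h1v h2v
      have hmap : (PySem.List.pyRange 1 (v + 1) 1).map (fun w => PySem.List.pyGetD st.1 w 0)
          = (PySem.List.pyRange 1 (v + 1) 1).map (fun w => ((blues.count w : Nat) : Int)) := by
        apply List.map_congr_left
        intro w hw
        have hw' := PySem.List.mem_pyRange_one.mp hw
        rw [C1 w (by omega) (by omega), hrep w (by omega)]
        omega
      rw [hmap, brp_sum_counts blues 1 (v + 1)]
      congr 1
      apply List.countP_congr
      intro x hx
      have := m1 x hx
      simp only [decide_eq_true_eq]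
      omega
    have hsumr : ∀ v : Int, 0 ≤ v → v ≤ n - 1 →
        ((PySem.List.pyRange (v + 1) (n + 1) 1).map (fun u => PySem.List.pyGetD st.2.1 u 0)).sum
          = ((reds.countP (fun x => decide (v < x)) : Nat) : Int) := by
      intro v h1v h2v
      have hmap : (PySem.List.pyRange (v + 1) (n + 1) 1).map (fun u => PySem.List.pyGetD st.2.1 u 0)
          = (PySem.List.pyRange (v + 1) (n + 1) 1).map (fun u => ((reds.count u : Nat) : Int)) := by
        apply List.map_congr_left
        intro u hu
        have hu' := PySem.List.mem_pyRange_one.mp hu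
        rw [C2 u (by omega) (by omega), hrep u (by omega)]
        omega
      rw [hmap, brp_sum_counts reds (v + 1) (n + 1)]
      congr 1
      apply List.countP_congr
      intro x hx
      have := m2 x hx
      simp only [decide_eq_true_eq]
      omega
    have hprefiff : (brpPrefOk st.1 (PySem.List.pyRange 1 (n + 1) 1) 0 = true)
        ↔ (∀ v : Int, 1 ≤ v → v ≤ n → ((blues.countP (fun x => decide (x ≤ v)) : Nat) : Int) ≤ v) := by
      have hiff := brpPrefOk_iff st.1 n.toNat 1 0
      rw [show (1 : Int) + ((n.toNat : Nat) : Int) = n + 1 from by omega] at hiff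
      rw [hiff]
      constructor
      · intro h v h1v h2v
        have hh := h v h1v (by omega)
        rw [hsum v h1v h2v] at hh
        omega
      · intro h v h1v h2v
        rw [hsum v h1v (by omega)]
        have := h v h1v (by omega)
        omega
    have hsufiff : (brpSufOk st.2.1 n (PySem.List.pyRange (n - 1) (-1) (-1)) 0 = true)
        ↔ (∀ v : Int, 0 ≤ v → v ≤ n - 1 → ((reds.countP (fun x => decide (v < x)) : Nat) : Int) ≤ n - v) := by
      have hiff := brpSufOk_iff st.2.1 n n.toNat (n - 1) 0
      rw [show (n - 1) - ((n.toNat : Nat) : Int) = -1 from by omega,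
          show n - 1 + 2 = n + 1 from by ring] at hiff
      rw [hiff]
      constructor
      · intro h v h1v h2v
        have hh := h v (by omega) (by omega)
        rw [hsumr v h1v h2v] at hh
        omega
      · intro h v h1v h2v
        rw [hsumr v (by omega) h2v]
        have := h v (by omega) h2v
        omega
    by_cases hp : brpPrefOk st.1 (PySem.List.pyRange 1 (n + 1) 1) 0 = false
    · rw [if_pos hp]
      constructor
      · intro h; exact absurd h (by decide)
      · rintro ⟨-, -, cb', -⟩
        have : brpPrefOk st.1 (PySem.List.pyRange 1 (n + 1) 1) 0 = true :=
          hprefiff.mpr (fun v h1v h2v => cb' v h1v h2v)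
        rw [this] at hp
        exact absurd hp (by decide)
    · rw [if_neg hp]
      have hptrue : brpPrefOk st.1 (PySem.List.pyRange 1 (n + 1) 1) 0 = true := by
        cases hb : brpPrefOk st.1 (PySem.List.pyRange 1 (n + 1) 1) 0
        · exact absurd hb hp
        · rfl
      by_cases hsn : brpSufOk st.2.1 n (PySem.List.pyRange (n - 1) (-1) (-1)) 0 = false
      · rw [if_pos hsn]
        constructor
        · intro h; exact absurd h (by decide)
        · rintro ⟨-, -, -, cr'⟩
          have : brpSufOk st.2.1 n (PySem.List.pyRange (n - 1) (-1) (-1)) 0 = true :=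
            hsufiff.mpr (fun v h1v h2v => cr' v h1v h2v)
          rw [this] at hsn
          exact absurd hsn (by decide)
      · rw [if_neg hsn]
        have hstrue : brpSufOk st.2.1 n (PySem.List.pyRange (n - 1) (-1) (-1)) 0 = true := by
          cases hb : brpSufOk st.2.1 n (PySem.List.pyRange (n - 1) (-1) (-1)) 0
          · exact absurd hb hsn
          · rfl
        constructor
        · intro _
          exact ⟨m1, m2, fun v h1v h2v => hprefiff.mp hptrue v h1v h2v,
                 fun v h1v h2v => hsufiff.mp hstrue v h1v h2v⟩
        · intro _; rfl

-- ---- negative n: both trivially "YES" ----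
lemma brp_neg (n : Int) (a : List Int) (s : String) (hn : n < 0) :
    blue_red_permutation n a s = "YES" ∧ blue_red_permutation_alt n a s = "YES" := by
  constructor
  · show brpGreedy _ _ _ _ _ = "YES"
    have h1 : PySem.List.pyRange 1 (n + 1) 1 = [] := PySem.List.pyRange_one_eq_nil (by omega)
    rw [h1]
    have h2 : PySem.List.sorted ([] : List Int) (fun x => x) false = [] := rfl
    rw [h2]
    rfl
  · show (if _ then _ else _) = "YES"
    have h0 : PySem.List.pyRange 0 n 1 = [] := PySem.List.pyRange_one_eq_nil (by omega)
    have hmax : max n 0 = 0 := by omega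
    rw [h0, hmax]
    have h1 : PySem.List.pyRange 1 (0 + 1) 1 = [] := PySem.List.pyRange_one_eq_nil (by omega)
    have h2 : PySem.List.pyRange (n - 1) (-1) (-1) = [] := PySem.List.pyRange_neg_one_eq_nil (by omega)
    simp only [List.foldl_nil, h1, h2]
    norm_num [brpPrefOk, brpSufOk]


-- ===== VERDICT (by name: the statement is the Claim_ definition above) =====
theorem blue_red_permutation_spec : Claim_equal_blue_red_permutation := by
  intro n a s _hdom _hpre
  unfold Spec_blue_red_permutation
  rcases lt_or_ge n 0 with hneg | hn
  · obtain ⟨hA, hB⟩ := brp_neg n a s hneg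
    rw [hA, hB]
  · obtain ⟨hAiff, hAcases⟩ := brp_A_iff n a s hn
    obtain ⟨hBiff, hBcases⟩ := brp_B_iff n a s hn
    by_cases hC : brpC n (brpBluesL a s.toList (PySem.List.pyRange 0 n 1))
        (brpRedsL a s.toList (PySem.List.pyRange 0 n 1))
    · rw [hAiff.mpr hC, hBiff.mpr hC]
    · rcases hAcases with hA | hA
      · exact absurd (hAiff.mp hA) hC
      · rcases hBcases with hB | hB
        · exact absurd (hBiff.mp hB) hC
        · rw [hA, hB]
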